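-- pv_equiv track=rewrite | github.com/RaiFernandesdosSantos/GeradorDeSenhas | models/senha.py | contaSequencia
-- ===== SOURCE A (Python) =====
-- import string
--
-- def contaSequencia(senha):
--     count = 0
--
--     for i in range(len(senha) - 2):
--         sequence = senha[i : i + 3]
--         if sequence.isalpha() and sequence.islower():
--             if sequence in string.ascii_lowercase:
--                 count += 1
--         elif sequence.isalpha() and sequence.isupper():
--             if sequence in string.ascii_uppercase:
--                 count += 1
--         elif sequence.isdigit():
--             if sequence in string.digits:
--                 count += 1
--
--     return count
-- ===== SOURCE B (Python) =====
-- def _consec(p, c):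
--     if 'a' <= p <= 'z':
--         lo, hi = 'a', 'z'
--     elif 'A' <= p <= 'Z':
--         lo, hi = 'A', 'Z'
--     elif '0' <= p <= '9':
--         lo, hi = '0', '9'
--     else:
--         return False
--     return lo <= c <= hi and ord(c) == ord(p) + 1
--
-- def contaSequencia(senha):
--     count = 0
--     run = 1
--     prev = None
--     for cur in senha:
--         if prev is not None and _consec(prev, cur):
--             run += 1
--         else:
--             run = 1
--         if run >= 3:
--             count += 1
--         prev = cur
--     return count
-- ===== Notes on version B (the rewrite author's own statement) =====
-- stated objective: alternative
-- what changed: B replaces A's per-index window slicing with three substring-membership searches in the alphabet strings by a single pass over the characters that keeps a running length of the current ascending same-class (a-z, A-Z, 0-9) run and counts a window whenever the run reaches 3.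
import Mathlib
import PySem

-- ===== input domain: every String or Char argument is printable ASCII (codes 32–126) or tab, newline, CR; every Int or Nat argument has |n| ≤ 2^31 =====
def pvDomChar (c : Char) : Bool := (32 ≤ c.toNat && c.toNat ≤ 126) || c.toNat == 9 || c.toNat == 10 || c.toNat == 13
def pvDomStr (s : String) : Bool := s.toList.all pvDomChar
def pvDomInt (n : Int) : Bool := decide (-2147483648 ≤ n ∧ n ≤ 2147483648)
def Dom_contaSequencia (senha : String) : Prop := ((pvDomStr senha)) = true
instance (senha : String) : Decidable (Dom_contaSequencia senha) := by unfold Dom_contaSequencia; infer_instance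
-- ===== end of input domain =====

-- ===== PORT A =====
-- B makes one pass tracking the current ascending-run length instead of A's per-window slice + substring-membership tests (objective: alternative decomposition).
-- Python str.islower()/isupper() hand-ported (no PySem string-level version): at least one cased char and no opposite-case char; exact on ASCII, where the cased characters are exactly the letters.
def pvStrIslower (s : List Char) : Bool :=
  s.any PySem.Chars.islower && s.all (fun c => !PySem.Chars.isupper c)

def pvStrIsupper (s : List Char) : Bool :=
  s.any PySem.Chars.isupper && s.all (fun c => !PySem.Chars.islower c)

def pvAsciiLowercase : List Char := "abcdefghijklmnopqrstuvwxyz".toList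
def pvAsciiUppercase : List Char := "ABCDEFGHIJKLMNOPQRSTUVWXYZ".toList
def pvDigitsList : List Char := "0123456789".toList

def contaSequencia (senha : String) : Int :=
  (PySem.List.pyRange 0 ((senha.toList.length : Int) - 2) 1).foldl
    (fun count i =>
      let seq := PySem.List.slice senha.toList (some i) (some (i + 3))
      if PySem.Chars.strIsalpha seq && pvStrIslower seq then
        (if PySem.Chars.isIn seq pvAsciiLowercase then count + 1 else count)
      else if PySem.Chars.strIsalpha seq && pvStrIsupper seq then
        (if PySem.Chars.isIn seq pvAsciiUppercase then count + 1 else count)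
      else if PySem.Chars.strIsdigit seq then
        (if PySem.Chars.isIn seq pvDigitsList then count + 1 else count)
      else count) 0

-- ===== PORT B =====
def pvConsec (p c : Char) : Bool :=
  if 'a' <= p && p <= 'z' then
    ('a' <= c && c <= 'z') && (c.toNat == p.toNat + 1)
  else if 'A' <= p && p <= 'Z' then
    ('A' <= c && c <= 'Z') && (c.toNat == p.toNat + 1)
  else if '0' <= p && p <= '9' then
    ('0' <= c && c <= '9') && (c.toNat == p.toNat + 1)
  else
    false

def pvStep (st : Option Char × Int × Int) (cur : Char) : Option Char × Int × Int :=
  let run : Int := match st.1 with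
    | some p => if pvConsec p cur then st.2.1 + 1 else 1
    | none => 1
  let count : Int := if 3 <= run then st.2.2 + 1 else st.2.2
  (some cur, run, count)

def contaSequencia_alt (senha : String) : Int :=
  (senha.toList.foldl pvStep (none, 1, 0)).2.2

-- ===== PRECONDITION & SPEC =====
def Spec_contaSequencia (senha : String) (out : Int) : Prop := out = contaSequencia_alt senha
instance (senha : String) (out : Int) : Decidable (Spec_contaSequencia senha out) := by unfold Spec_contaSequencia; infer_instance

-- ===== CLAIM (what is proved, stated in full; the proofs are below) =====
def Claim_equal_contaSequencia : Prop := ∀ (senha : String), Dom_contaSequencia senha → Spec_contaSequencia senha (contaSequencia senha)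

-- ===== LEMMAS AND PROOFS =====

theorem pvToNatOfNat (n : Nat) (h : n < 55296) : (Char.ofNat n).toNat = n := by
  simp [Char.toNat_ofNat]; omega

theorem pvPrefix3 (a b c : Char) (m : List Char) :
    [a, b, c] <+: m ↔ m[0]? = some a ∧ m[1]? = some b ∧ m[2]? = some c := by
  rcases m with _ | ⟨x, _ | ⟨y, _ | ⟨z, t⟩⟩⟩ <;>
    simp [List.cons_prefix_cons]
  constructor <;> rintro ⟨rfl, rfl, rfl⟩ <;> exact ⟨rfl, rfl, rfl⟩

theorem pvIsInMapRange (base n : Nat) (hv : base + n < 55296) (a b c : Char) :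
    PySem.Chars.isIn [a, b, c] ((List.range n).map (fun k => Char.ofNat (base + k))) = true ↔
      (base ≤ a.toNat ∧ a.toNat + 2 < base + n ∧
        b.toNat = a.toNat + 1 ∧ c.toNat = a.toNat + 2) := by
  rw [← PySem.Chars.exists_prefix_drop_iff_isIn]
  constructor
  · rintro ⟨j, hp⟩
    rw [pvPrefix3] at hp
    obtain ⟨h0, h1, h2⟩ := hp
    simp only [List.getElem?_drop, List.getElem?_map] at h0 h1 h2
    have hn2 : j + 2 < n := by
      by_contra hge
      rw [List.getElem?_eq_none (by simpa using hge)] at h2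
      simp at h2
    rw [List.getElem?_range (by omega)] at h0
    rw [List.getElem?_range (by omega)] at h1
    rw [List.getElem?_range (by omega)] at h2
    simp only [Option.map_some, Option.some_inj] at h0 h1 h2
    have e0 : a.toNat = base + (j + 0) := by rw [← h0, pvToNatOfNat]; omega
    have e1 : b.toNat = base + (j + 1) := by rw [← h1, pvToNatOfNat]; omega
    have e2 : c.toNat = base + (j + 2) := by rw [← h2, pvToNatOfNat]; omega
    omega
  · rintro ⟨h1, h2, h3, h4⟩
    refine ⟨a.toNat - base, ?_⟩
    rw [pvPrefix3]
    have hget : ∀ k : Nat, k < 3 →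
        ((List.range n).map (fun k => Char.ofNat (base + k)))[(a.toNat - base) + k]? =
          some (Char.ofNat (base + (a.toNat - base + k))) := by
      intro k hk
      rw [List.getElem?_map, List.getElem?_range (by omega)]
      rfl
    have ea : Char.ofNat (base + (a.toNat - base + 0)) = a := by
      have h : base + (a.toNat - base + 0) = a.toNat := by omega
      rw [h, Char.ofNat_toNat]
    have eb : Char.ofNat (base + (a.toNat - base + 1)) = b := by
      have h : base + (a.toNat - base + 1) = b.toNat := by omega
      rw [h, Char.ofNat_toNat]
    have ec : Char.ofNat (base + (a.toNat - base + 2)) = c := by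
      have h : base + (a.toNat - base + 2) = c.toNat := by omega
      rw [h, Char.ofNat_toNat]
    refine ⟨?_, ?_, ?_⟩
    · rw [List.getElem?_drop, hget 0 (by omega), ea]
    · rw [List.getElem?_drop, hget 1 (by omega), eb]
    · rw [List.getElem?_drop, hget 2 (by omega), ec]

theorem pvLowerEq : pvAsciiLowercase = (List.range 26).map (fun k => Char.ofNat (97 + k)) := by decide
theorem pvUpperEq : pvAsciiUppercase = (List.range 26).map (fun k => Char.ofNat (65 + k)) := by decide
theorem pvDigitsEq : pvDigitsList = (List.range 10).map (fun k => Char.ofNat (48 + k)) := by decide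

theorem pvConsec_iff (p q : Char) : pvConsec p q = true ↔
    ((97 ≤ p.toNat ∧ p.toNat ≤ 122 ∧ 97 ≤ q.toNat ∧ q.toNat ≤ 122) ∨
     (65 ≤ p.toNat ∧ p.toNat ≤ 90 ∧ 65 ≤ q.toNat ∧ q.toNat ≤ 90) ∨
     (48 ≤ p.toNat ∧ p.toNat ≤ 57 ∧ 48 ≤ q.toNat ∧ q.toNat ≤ 57)) ∧
    q.toNat = p.toNat + 1 := by
  simp only [pvConsec, Char.le_def, UInt32.le_iff_toNat_le]
  split_ifs with h1 h2 h3 <;>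
    simp_all [UInt32.le_iff_toNat_le] <;> omega

theorem pvIslower_iff (x : Char) : PySem.Chars.islower x = true ↔ 97 ≤ x.toNat ∧ x.toNat ≤ 122 := by
  simp [PySem.Chars.islower, Char.le_def, UInt32.le_iff_toNat_le]
theorem pvIsupper_iff (x : Char) : PySem.Chars.isupper x = true ↔ 65 ≤ x.toNat ∧ x.toNat ≤ 90 := by
  simp [PySem.Chars.isupper, Char.le_def, UInt32.le_iff_toNat_le]
theorem pvIsdigit_iff (x : Char) : PySem.Chars.isdigit x = true ↔ 48 ≤ x.toNat ∧ x.toNat ≤ 57 := by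
  simp [PySem.Chars.isdigit, Char.le_def, UInt32.le_iff_toNat_le]
theorem pvIslower_iff_f (x : Char) : PySem.Chars.islower x = false ↔ ¬(97 ≤ x.toNat ∧ x.toNat ≤ 122) := by
  rw [Bool.eq_false_iff]; exact not_congr (pvIslower_iff x)
theorem pvIsupper_iff_f (x : Char) : PySem.Chars.isupper x = false ↔ ¬(65 ≤ x.toNat ∧ x.toNat ≤ 90) := by
  rw [Bool.eq_false_iff]; exact not_congr (pvIsupper_iff x)
theorem pvIsdigit_iff_f (x : Char) : PySem.Chars.isdigit x = false ↔ ¬(48 ≤ x.toNat ∧ x.toNat ≤ 57) := by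
  rw [Bool.eq_false_iff]; exact not_congr (pvIsdigit_iff x)

-- A's per-window branch chain, applied to a length-3 window, is exactly B's pair test
theorem pvCondLemma (a b c : Char) (count : Int) :
    (if PySem.Chars.strIsalpha [a, b, c] && pvStrIslower [a, b, c] then
        (if PySem.Chars.isIn [a, b, c] pvAsciiLowercase then count + 1 else count)
      else if PySem.Chars.strIsalpha [a, b, c] && pvStrIsupper [a, b, c] then
        (if PySem.Chars.isIn [a, b, c] pvAsciiUppercase then count + 1 else count)
      else if PySem.Chars.strIsdigit [a, b, c] then
        (if PySem.Chars.isIn [a, b, c] pvDigitsList then count + 1 else count)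
      else count) =
    count + (if pvConsec a b && pvConsec b c then 1 else 0) := by
  have hlo := pvIsInMapRange 97 26 (by omega) a b c
  have hup := pvIsInMapRange 65 26 (by omega) a b c
  have hdi := pvIsInMapRange 48 10 (by omega) a b c
  rw [← pvLowerEq] at hlo
  rw [← pvUpperEq] at hup
  rw [← pvDigitsEq] at hdi
  split_ifs <;>
    (simp only [PySem.Chars.strIsalpha, PySem.Chars.strIsdigit, pvStrIslower, pvStrIsupper,
      PySem.Chars.isalpha, List.any_cons, List.all_cons, List.any_nil, List.all_nil,
      List.isEmpty_cons, Bool.and_eq_true, Bool.or_eq_true,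
      Bool.not_eq_true', hlo, hup, hdi, pvIslower_iff, pvIsupper_iff,
      pvIslower_iff_f, pvIsupper_iff_f, pvIsdigit_iff_f, pvIsdigit_iff, pvConsec_iff,
      Bool.not_false, Bool.and_true, Bool.true_and, Bool.or_false,
      not_and, not_or, not_le] at *) <;>
    omega

def pvCountT : List Char → Int
  | a :: b :: c :: t => (if pvConsec a b && pvConsec b c then 1 else 0) + pvCountT (b :: c :: t)
  | _ => 0

def pvTrip (l : List Char) (i : Nat) : Int :=
  match l.drop i with
  | a :: b :: c :: _ => if pvConsec a b && pvConsec b c then 1 else 0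
  | _ => 0

theorem pvTrip_cons (x : Char) (l : List Char) (i : Nat) :
    pvTrip (x :: l) (i + 1) = pvTrip l i := by
  simp [pvTrip]

theorem pvSumTrip : ∀ l : List Char,
    ((List.range (l.length - 2)).map (pvTrip l)).sum = pvCountT l := by
  intro l
  induction l with
  | nil => simp [pvCountT]
  | cons x l ih =>
    rcases l with _ | ⟨y, _ | ⟨z, t⟩⟩
    · simp [pvCountT]
    · simp [pvCountT]
    · have hlen : (x :: y :: z :: t).length - 2 = ((y :: z :: t).length - 2) + 1 := by
        simp
      rw [hlen, List.range_succ_eq_map]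
      simp only [List.map_cons, List.map_map, List.sum_cons]
      have hmap : (List.range ((y :: z :: t).length - 2)).map (pvTrip (x :: y :: z :: t) ∘ Nat.succ)
          = (List.range ((y :: z :: t).length - 2)).map (pvTrip (y :: z :: t)) := by
        apply List.map_congr_left
        intro i _
        simpa using pvTrip_cons x (y :: z :: t) i
      rw [hmap, ih]
      simp [pvCountT, pvTrip]

def pvG (c : Char) (ok : Bool) : List Char → Int
  | [] => 0
  | x :: t => if pvConsec c x then (if ok then 1 else 0) + pvG x true t else pvG x false t

theorem pvFoldG : ∀ (l : List Char) (c : Char) (run count : Int), 1 ≤ run →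
    (l.foldl pvStep (some c, run, count)).2.2 = count + pvG c (decide (2 ≤ run)) l := by
  intro l
  induction l with
  | nil => intro c run count _; simp [pvG]
  | cons x t ih =>
    intro c run count hrun
    rw [List.foldl_cons]
    by_cases hc : pvConsec c x = true
    · have hstep : pvStep (some c, run, count) x =
          (some x, run + 1, if 3 ≤ run + 1 then count + 1 else count) := by
        simp [pvStep, hc]
      rw [hstep, ih x (run + 1) _ (by omega)]
      have h2 : decide ((2:Int) ≤ run + 1) = true := by simp; omega
      rw [h2]
      simp only [pvG, hc, if_true]
      split_ifs with h3 h4 h4 <;> simp_all <;> omega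
    · have hc' : pvConsec c x = false := by simpa using hc
      have hstep : pvStep (some c, run, count) x = (some x, 1, count) := by
        simp [pvStep, hc']
      rw [hstep, ih x 1 _ (by omega)]
      simp [pvG, hc']

theorem pvG_true (c : Char) (l : List Char) :
    pvG c true l = pvG c false l +
      (match l with | x :: _ => if pvConsec c x then 1 else 0 | [] => 0) := by
  cases l with
  | nil => simp [pvG]
  | cons x t => simp only [pvG]; split_ifs <;> simp <;> omega

theorem pvG_false : ∀ (l : List Char) (c : Char), pvG c false l = pvCountT (c :: l) := by
  intro l
  induction l with
  | nil => intro c; simp [pvG, pvCountT]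
  | cons x t ih =>
    intro c
    rw [show pvG c false (x :: t) = if pvConsec c x then pvG x true t else pvG x false t from by
      simp [pvG]]
    rw [pvG_true, ih x]
    cases t with
    | nil => simp [pvCountT]
    | cons y t' =>
      simp only [pvCountT]
      split_ifs with h1 h2 h2 <;> simp_all <;> ring

theorem pvAltEq (senha : String) : contaSequencia_alt senha = pvCountT senha.toList := by
  unfold contaSequencia_alt
  cases h : senha.toList with
  | nil => simp [pvCountT]
  | cons x t =>
    have hstep : pvStep (none, 1, 0) x = (some x, 1, 0) := by simp [pvStep]
    rw [List.foldl_cons, hstep, pvFoldG t x 1 0 (by omega)]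
    have hd : decide ((2:Int) ≤ 1) = false := by decide
    rw [hd, pvG_false]
    ring

theorem pvAEq (senha : String) : contaSequencia senha = pvCountT senha.toList := by
  unfold contaSequencia
  rcases h : senha.toList with _ | ⟨x, _ | ⟨y, t⟩⟩
  · simp [pvCountT, PySem.List.pyRange]
  · norm_num
    simp [pvCountT]
  · have hlen : (((x :: y :: t).length : Nat) : Int) - 2 = ((t.length : Nat) : Int) := by
      simp; omega
    rw [hlen, PySem.List.pyRange_zero_natCast, List.foldl_map]
    have hcongr : ∀ (count : Int), ∀ j ∈ List.range t.length,
        (let seq := PySem.List.slice (x :: y :: t) (some ((j : Nat) : Int)) (some (((j : Nat) : Int) + 3));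
        if PySem.Chars.strIsalpha seq && pvStrIslower seq then
          (if PySem.Chars.isIn seq pvAsciiLowercase then count + 1 else count)
        else if PySem.Chars.strIsalpha seq && pvStrIsupper seq then
          (if PySem.Chars.isIn seq pvAsciiUppercase then count + 1 else count)
        else if PySem.Chars.strIsdigit seq then
          (if PySem.Chars.isIn seq pvDigitsList then count + 1 else count)
        else count)
        = count + pvTrip (x :: y :: t) j := by
      intro count j hj
      simp only [List.mem_range] at hj
      have hj2 : j + 2 < (x :: y :: t).length := by simp; omega
      have hdrop : (x :: y :: t).drop j =
          (x :: y :: t)[j] :: (x :: y :: t)[j+1] :: (x :: y :: t)[j+2] :: (x :: y :: t).drop (j + 3) := by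
        rw [List.drop_eq_getElem_cons (by omega)]
        congr 1
        rw [List.drop_eq_getElem_cons (by omega)]
        congr 1
        rw [List.drop_eq_getElem_cons (by omega)]
      have hslice : PySem.List.slice (x :: y :: t) (some ((j : Nat) : Int)) (some (((j : Nat) : Int) + 3)) =
          [(x :: y :: t)[j], (x :: y :: t)[j+1], (x :: y :: t)[j+2]] := by
        rw [show (((j : Nat) : Int) + 3) = (((j : Nat) : Int) + ((3 : Nat) : Int)) from by norm_num,
          PySem.List.slice_natCast_add, hdrop]
        rfl
      simp only [hslice]
      rw [pvCondLemma]
      have htr : pvTrip (x :: y :: t) j =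
          (if pvConsec (x :: y :: t)[j] (x :: y :: t)[j+1] && pvConsec (x :: y :: t)[j+1] (x :: y :: t)[j+2] then 1 else 0) := by
        simp only [pvTrip]
        rw [hdrop]
      rw [htr]
    rw [PySem.List.foldl_congr_mem _ _ _ _ (fun acc j hjm => hcongr acc j hjm)]
    rw [PySem.List.foldl_add]
    have hlt : t.length = (x :: y :: t).length - 2 := by simp
    rw [hlt, pvSumTrip]
    ring

-- ===== VERDICT (by name: the statement is the Claim_ definition above) =====
theorem contaSequencia_spec : Claim_equal_contaSequencia := by
  intro senha _
  unfold Spec_contaSequencia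
  rw [pvAEq, pvAltEq]
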